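-- pv_equiv track=rewrite | github.com/yasamoka/Baradise-Lost | util.py | get_edition_numbers_quoted_strings
-- ===== SOURCE A (Python) =====
-- def get_edition_numbers_quoted_strings(edition_numbers):
--   num_of_editions = len(edition_numbers)
--   num_of_edition_numbers_quoted_combinations = 2 ** num_of_editions
--   edition_numbers_quoted_strings = [None] * num_of_edition_numbers_quoted_combinations
--   edition_numbers_quoted_strings[0] = "None"
--   for i in range(1, num_of_edition_numbers_quoted_combinations):
--     edition_numbers_quoted_bool = [bool(i & (1 << n)) for n in range(num_of_editions)]
--     edition_numbers_quoted = list()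
--     for j in range(num_of_editions):
--       edition_number_is_quoted = edition_numbers_quoted_bool[j]
--       if edition_number_is_quoted:
--         edition_numbers_quoted.append(str(edition_numbers[j]))
--     edition_numbers_quoted_strings[i] = ", ".join(edition_numbers_quoted)
--   return edition_numbers_quoted_strings
-- ===== SOURCE B (Python) =====
-- def get_edition_numbers_quoted_strings(edition_numbers):
--     result = [""]
--     for i in range(1, 1 << len(edition_numbers)):
--         high = i.bit_length() - 1
--         s = str(edition_numbers[high])
--         parent = i - (1 << high)
--         result.append(s if parent == 0 else result[parent] + ", " + s)
--     result[0] = "None"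
--     return result
-- ===== Notes on version B (the rewrite author's own statement) =====
-- stated objective: faster
-- what changed: Instead of re-deriving each subset's bit-mask with an inner O(n) loop and re-joining from scratch, B builds result[i] in O(1) string operations from the already computed result[i - 2^(bit_length(i)-1)] (the subset with its highest bit stripped) plus the highest-bit edition number.
import Mathlib
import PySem

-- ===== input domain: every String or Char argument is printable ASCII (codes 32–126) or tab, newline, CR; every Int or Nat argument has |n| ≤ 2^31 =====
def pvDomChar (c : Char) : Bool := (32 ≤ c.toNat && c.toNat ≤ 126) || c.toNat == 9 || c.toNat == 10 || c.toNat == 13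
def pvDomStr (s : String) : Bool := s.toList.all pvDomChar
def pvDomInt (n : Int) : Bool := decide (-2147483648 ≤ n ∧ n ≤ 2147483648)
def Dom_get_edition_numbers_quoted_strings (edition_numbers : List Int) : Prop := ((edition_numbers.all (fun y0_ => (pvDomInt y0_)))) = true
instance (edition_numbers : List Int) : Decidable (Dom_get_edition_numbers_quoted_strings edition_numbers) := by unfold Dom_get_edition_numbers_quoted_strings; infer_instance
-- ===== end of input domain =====

-- B replaces A's per-subset inner bit-scan and re-join by a dynamic-programming step that extends
-- the already-computed string of the subset with its highest bit removed (objective: faster).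

-- ===== PORT A =====
def get_edition_numbers_quoted_strings (edition_numbers : List Int) : List String :=
  let num_of_editions := edition_numbers.length
  let num_comb := 2 ^ num_of_editions
  -- [None] * N then slot 0 := "None"; "" is the None placeholder, every other slot is written before return
  let init := (List.replicate num_comb "").set 0 "None"
  (PySem.List.pyRange 1 (num_comb : Int)).foldl (fun arr i =>
    -- bool(i & (1 << n)) for n in range(num_of_editions); i ≥ 1 here so i.toNat is exact
    let bools := (PySem.List.pyRange 0 (num_of_editions : Int)).map
      (fun n => i.toNat &&& (1 <<< n.toNat) != 0)
    let quoted := (PySem.List.pyRange 0 (num_of_editions : Int)).foldl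
      (fun acc j =>
        if PySem.List.pyGetD bools j false then
          acc ++ [PySem.Int.toStr (PySem.List.pyGetD edition_numbers j 0)]  -- j < len, index exact
        else acc) []
    arr.set i.toNat (PySem.Str.join ", " quoted)) init

-- ===== PORT B =====
def get_edition_numbers_quoted_strings_alt (edition_numbers : List Int) : List String :=
  let n := edition_numbers.length
  let result := (PySem.List.pyRange 1 ((1 <<< n : Nat) : Int)).foldl (fun result i =>
    let high := PySem.Int.bitLength i - 1      -- i.bit_length() - 1
    let s := PySem.Int.toStr (PySem.List.pyGetD edition_numbers (high : Int) 0)  -- high < n, exact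
    let parent := i - ((1 <<< high : Nat) : Int)
    result ++ [if parent == 0 then s
               else PySem.List.pyGetD result parent "" ++ ", " ++ s]) [""]
  result.set 0 "None"

-- ===== PRECONDITION & SPEC =====
def Spec_get_edition_numbers_quoted_strings (edition_numbers : List Int) (out : List String) : Prop := out = get_edition_numbers_quoted_strings_alt edition_numbers
instance (edition_numbers : List Int) (out : List String) : Decidable (Spec_get_edition_numbers_quoted_strings edition_numbers out) := by unfold Spec_get_edition_numbers_quoted_strings; infer_instance

-- ===== CLAIM (what is proved, stated in full; the proofs are below) =====
def Claim_equal_get_edition_numbers_quoted_strings : Prop := ∀ (edition_numbers : List Int), Dom_get_edition_numbers_quoted_strings edition_numbers → Spec_get_edition_numbers_quoted_strings edition_numbers (get_edition_numbers_quoted_strings edition_numbers)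

-- ===== LEMMAS AND PROOFS =====

-- bit facts
lemma pv_and_pow (i k : Nat) : (i &&& (1 <<< k) != 0) = i.testBit k := by
  rw [Nat.one_shiftLeft, Nat.and_two_pow]
  cases h : i.testBit k <;> simp

lemma pv_testBit_top (i h : Nat) (h1 : 2^h ≤ i) (h2 : i < 2^(h+1)) : i.testBit h = true := by
  rw [Nat.testBit_eq_decide_div_mod_eq]
  have : i / 2^h = 1 := Nat.div_eq_of_lt_le (by omega) (by rw [Nat.pow_succ] at h2; omega)
  simp [this]

lemma pv_bitLength (i : Nat) (hi : i ≠ 0) :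
    PySem.Int.bitLength (i : Int) - 1 = Nat.log2 i := by
  have h2 := PySem.Int.lt_two_pow_bitLength (i : Int)
  have h1 := PySem.Int.two_pow_bitLength_le (i : Int) (by exact_mod_cast hi)
  rw [Int.natAbs_natCast] at h1 h2
  have hbl : PySem.Int.bitLength (i : Int) ≠ 0 := by
    intro h0
    rw [h0, pow_zero] at h2
    omega
  have hle := (Nat.le_log2 hi).mpr h1
  have hlt := (Nat.log2_lt hi).mpr h2
  omega

-- filter/range split facts
lemma pv_filter_range_high (n h : Nat) (q : Nat → Bool) (hq : ∀ j, h ≤ j → q j = false) :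
    (List.range n).filter q = (List.range (min h n)).filter q := by
  rcases Nat.le_total n h with hnh | hhn
  · rw [Nat.min_eq_right hnh]
  · rw [Nat.min_eq_left hhn]
    have : n = h + (n - h) := by omega
    rw [this, List.range_add, List.filter_append]
    have : ((List.range (n - h)).map (fun x => h + x)).filter q = [] := by
      rw [List.filter_eq_nil_iff]
      intro a ha
      simp only [List.mem_map] at ha
      obtain ⟨x, _, rfl⟩ := ha
      exact by simp [hq (h + x) (by omega)]
    rw [this, List.append_nil]

def pvBits (n i : Nat) : List Nat := (List.range n).filter (fun j => i.testBit j)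

lemma pv_bits_split (n i h : Nat) (h1 : 2^h ≤ i) (h2 : i < 2^(h+1)) (hn : h < n) :
    pvBits n i = pvBits n (i - 2^h) ++ [h] := by
  unfold pvBits
  have hp : i - 2^h < 2^h := by rw [Nat.pow_succ] at h2; omega
  have hi : i = 2^h + (i - 2^h) := by omega
  have hL : (List.range n).filter (fun j => i.testBit j)
      = (List.range (h+1)).filter (fun j => i.testBit j) := by
    have := pv_filter_range_high n (h+1) (fun j => i.testBit j)
      (fun j hj => Nat.testBit_lt_two_pow (lt_of_lt_of_le h2 (Nat.pow_le_pow_right (by norm_num) hj)))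
    rwa [Nat.min_eq_left (by omega)] at this
  have hR : (List.range n).filter (fun j => (i - 2^h).testBit j)
      = (List.range h).filter (fun j => (i - 2^h).testBit j) := by
    have := pv_filter_range_high n h (fun j => (i - 2^h).testBit j)
      (fun j hj => Nat.testBit_lt_two_pow (lt_of_lt_of_le hp (Nat.pow_le_pow_right (by norm_num) hj)))
    rwa [Nat.min_eq_left (by omega)] at this
  rw [hL, hR, List.range_succ, List.filter_append]
  have hTop : (List.filter (fun j => i.testBit j) [h]) = [h] := by
    simp [pv_testBit_top i h h1 h2]
  rw [hTop]
  congr 1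
  apply List.filter_congr
  intro x hx
  simp only [List.mem_range] at hx
  conv_lhs => rw [hi]
  rw [Nat.testBit_two_pow_add_gt hx]

lemma pv_bits_zero (n : Nat) : pvBits n 0 = [] := by
  simp [pvBits]

lemma pv_bits_ne_nil (n p : Nat) (hp : p ≠ 0) (hpn : p < 2^n) : pvBits n p ≠ [] := by
  have h1 := Nat.log2_self_le hp
  have h2 := @Nat.lt_log2_self p
  have hln : Nat.log2 p < n := by
    rcases Nat.lt_or_ge (Nat.log2 p) n with hc | hc
    · exact hc
    · have := le_trans (Nat.pow_le_pow_right (by norm_num) hc) h1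
      omega
  apply List.ne_nil_of_mem (a := Nat.log2 p)
  unfold pvBits
  rw [List.mem_filter]
  exact ⟨List.mem_range.mpr hln, pv_testBit_top p _ h1 h2⟩

-- join of a non-empty list extended by one more part
lemma pv_cjoin_snoc (sep y : List Char) (l : List (List Char)) (h : l ≠ []) :
    PySem.Chars.join sep (l ++ [y]) = PySem.Chars.join sep l ++ sep ++ y := by
  induction l with
  | nil => exact absurd rfl h
  | cons x xs ih =>
    cases xs with
    | nil => rw [List.cons_append, List.nil_append, PySem.Chars.join_cons_cons,
        PySem.Chars.join_singleton, PySem.Chars.join_singleton]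
    | cons a l2 =>
      have hih := ih (by simp)
      simp only [List.cons_append] at hih ⊢
      rw [PySem.Chars.join_cons_cons sep x a (l2 ++ [y]), hih,
        PySem.Chars.join_cons_cons sep x a l2]
      simp [List.append_assoc]

lemma pv_join_snoc (sep y : String) (parts : List String) (hp : parts ≠ []) :
    PySem.Str.join sep (parts ++ [y]) = PySem.Str.join sep parts ++ sep ++ y := by
  apply String.toList_inj.mp
  rw [String.toList_append, String.toList_append, PySem.Str.toList_join, PySem.Str.toList_join,
    List.map_append, List.map_singleton, pv_cjoin_snoc _ _ _ (by simpa using hp)]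

lemma pv_join_single (sep y : String) : PySem.Str.join sep [y] = y := by
  apply String.toList_inj.mp
  rw [PySem.Str.toList_join, List.map_singleton, PySem.Chars.join_singleton]

-- the comma-joined string of the subset selected by i's set bits
def pvVal (e : List Int) (i : Nat) : String :=
  PySem.Str.join ", " ((pvBits e.length i).map (fun j => PySem.Int.toStr (e.getD j 0)))

def pvSpecList (e : List Int) : List String :=
  (List.range (2 ^ e.length)).map (fun i => if i = 0 then "None" else pvVal e i)

lemma pv_val_rec (e : List Int) (i h : Nat) (h1 : 2^h ≤ i) (h2 : i < 2^(h+1)) (hn : h < e.length) :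
    pvVal e i = if i - 2^h = 0 then PySem.Int.toStr (e.getD h 0)
      else pvVal e (i - 2^h) ++ ", " ++ PySem.Int.toStr (e.getD h 0) := by
  unfold pvVal
  rw [pv_bits_split e.length i h h1 h2 hn, List.map_append, List.map_singleton]
  by_cases hp : i - 2^h = 0
  · rw [hp, pv_bits_zero]
    simp [pv_join_single]
  · rw [if_neg hp]
    rw [pv_join_snoc _ _ _ (by
      simp only [ne_eq, List.map_eq_nil_iff]
      exact pv_bits_ne_nil e.length (i - 2^h) hp (by
        have hle : 2^h ≤ 2^e.length := Nat.pow_le_pow_right (by norm_num) (le_of_lt hn)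
        have hlt : i - 2^h < 2^h := by rw [Nat.pow_succ] at h2; omega
        omega))]

-- A's writing loop: the element left at each position
lemma pv_foldl_set_length {α : Type} (g : Nat → α) (xs : List Nat) (l : List α) :
    (xs.foldl (fun a k => a.set (k+1) (g (k+1))) l).length = l.length := by
  induction xs generalizing l with
  | nil => rfl
  | cons x xs ih => simp [List.foldl_cons, ih]

lemma pv_foldl_set_getElem? {α : Type} (g : Nat → α) (m : Nat) (l : List α) (j : Nat) :
    ((List.range m).foldl (fun a k => a.set (k+1) (g (k+1))) l)[j]? =
      if 1 ≤ j ∧ j ≤ m ∧ j < l.length then some (g j) else l[j]? := by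
  induction m with
  | zero =>
    simp only [List.range_zero, List.foldl_nil]
    rw [if_neg (by omega)]
  | succ m ih =>
    rw [List.range_succ, List.foldl_append, List.foldl_cons, List.foldl_nil,
      List.getElem?_set, pv_foldl_set_length, ih]
    split_ifs with h1 h2 h3 h3 <;>
      first
        | rfl
        | omega
        | simp_all

-- A computes pvSpecList
lemma pv_A_eq (e : List Int) : get_edition_numbers_quoted_strings e = pvSpecList e := by
  simp only [get_edition_numbers_quoted_strings]
  rw [PySem.List.pyRange_one 1 ((2 ^ e.length : Nat) : Int)]
  have hone : (1 : Nat) ≤ 2 ^ e.length := Nat.one_le_two_pow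
  have hN : ((2 ^ e.length : Nat) : Int) - 1 = ((2 ^ e.length - 1 : Nat) : Int) := by
    push_cast [hone]
    ring
  rw [hN, Int.toNat_natCast, List.foldl_map]
  rw [PySem.List.foldl_congr_mem _ _ (fun arr k => arr.set (k+1) (pvVal e (k+1))) _ ?hcong]
  case hcong =>
    intro arr k _
    have ht : ((1 : Int) + (k : Nat)).toNat = k + 1 := by omega
    simp only [ht]
    rw [PySem.List.pyRange_zero_nat, List.map_map, List.foldl_map]
    rw [PySem.List.foldl_congr_mem _ _
      (fun acc k' => if (k+1).testBit k' then acc ++ [PySem.Int.toStr (e.getD k' 0)] else acc)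
      _ ?hinner]
    case hinner =>
      intro acc k' hk'
      simp only [PySem.List.pyGetD_natCast]
      rw [PySem.List.getD_map_range _ _ _ _ (List.mem_range.mp hk')]
      simp only [Function.comp, Int.toNat_natCast]
      simp only [pv_and_pow]
    rw [PySem.List.foldl_append_if]
    simp only [List.nil_append]
    rfl
  apply List.ext_getElem?
  intro j
  rw [pv_foldl_set_getElem?]
  have hlen : ((List.replicate (2 ^ e.length) "").set 0 "None").length = 2 ^ e.length := by
    simp
  rw [hlen]
  simp only [pvSpecList, List.getElem?_map]
  rcases Nat.eq_zero_or_pos j with hj0 | hj0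
  · subst hj0
    rw [if_neg (by omega), List.getElem?_set]
    simp
  · by_cases hj : j < 2 ^ e.length
    · rw [if_pos ⟨by omega, by omega, hj⟩]
      rw [show (List.range (2 ^ e.length))[j]? = some j by simp [hj]]
      simp only [Option.map_some]
      rw [if_neg (by omega : ¬ j = 0)]
    · rw [if_neg (by omega), List.getElem?_set, if_neg (by omega)]
      rw [List.getElem?_eq_none (l := List.replicate (2 ^ e.length) "") (by simp; omega)]
      rw [List.getElem?_eq_none (l := List.range (2 ^ e.length)) (by simp; omega)]
      rfl

-- B's dynamic-programming step, with the Python index bookkeeping made explicit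
def pvStep (e : List Int) (res : List String) (k : Nat) : List String :=
  res ++ [if k + 1 - 2 ^ Nat.log2 (k+1) = 0 then PySem.Int.toStr (e.getD (Nat.log2 (k+1)) 0)
          else res.getD (k + 1 - 2 ^ Nat.log2 (k+1)) "" ++ ", " ++
            PySem.Int.toStr (e.getD (Nat.log2 (k+1)) 0)]

lemma pv_B_inv (e : List Int) (m : Nat) (hm : m ≤ 2 ^ e.length - 1) :
    (List.range m).foldl (pvStep e) [""] =
      (List.range (m+1)).map (fun i => if i = 0 then "" else pvVal e i) := by
  induction m with
  | zero => simp
  | succ m ih =>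
    have hone : (1 : Nat) ≤ 2 ^ e.length := Nat.one_le_two_pow
    rw [List.range_succ, List.foldl_append, List.foldl_cons, List.foldl_nil, ih (by omega)]
    set i := m + 1 with hidef
    have hi0 : i ≠ 0 := by omega
    have h1 : 2 ^ Nat.log2 i ≤ i := Nat.log2_self_le hi0
    have h2 : i < 2 ^ (Nat.log2 i + 1) := Nat.lt_log2_self
    have hn : Nat.log2 i < e.length := by
      rcases Nat.lt_or_ge (Nat.log2 i) e.length with hc | hc
      · exact hc
      · have := le_trans (Nat.pow_le_pow_right (by norm_num) hc) h1
        omega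
    have hp : i - 2 ^ Nat.log2 i < i := by
      have := Nat.two_pow_pos (Nat.log2 i)
      omega
    unfold pvStep
    rw [List.range_succ (n := m + 1), List.map_append, List.map_singleton]
    congr 1
    rw [PySem.List.getD_map_range _ _ _ _ (by omega : i - 2 ^ Nat.log2 i < m + 1)]
    rw [if_neg (by omega : ¬ i = 0)]
    rw [pv_val_rec e i (Nat.log2 i) h1 h2 hn]
    by_cases hz : i - 2 ^ Nat.log2 i = 0
    · rw [if_pos hz, if_pos hz]
    · rw [if_neg hz, if_neg hz, if_neg hz]

-- B computes pvSpecList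
lemma pv_B_eq (e : List Int) : get_edition_numbers_quoted_strings_alt e = pvSpecList e := by
  simp only [get_edition_numbers_quoted_strings_alt]
  rw [PySem.List.pyRange_one 1 ((1 <<< e.length : Nat) : Int)]
  have hone : (1 : Nat) ≤ 2 ^ e.length := Nat.one_le_two_pow
  have hN : ((1 <<< e.length : Nat) : Int) - 1 = ((2 ^ e.length - 1 : Nat) : Int) := by
    rw [Nat.one_shiftLeft]
    push_cast [hone]
    ring
  rw [hN, Int.toNat_natCast, List.foldl_map]
  rw [PySem.List.foldl_congr_mem _ _ (pvStep e) _ ?hcong]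
  case hcong =>
    intro res k _
    have hik : (1 : Int) + (k : Nat) = ((k + 1 : Nat) : Int) := by push_cast; ring
    simp only [hik]
    rw [pv_bitLength (k+1) (by omega), Nat.one_shiftLeft]
    have hp2 : 2 ^ Nat.log2 (k+1) ≤ k + 1 := Nat.log2_self_le (by omega)
    rw [show ((k+1 : Nat) : Int) - ((2 ^ Nat.log2 (k+1) : Nat) : Int)
        = (((k+1) - 2 ^ Nat.log2 (k+1) : Nat) : Int) from (Int.natCast_sub hp2).symm]
    simp only [PySem.List.pyGetD_natCast]
    unfold pvStep
    by_cases hz : (k+1) - 2 ^ Nat.log2 (k+1) = 0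
    · simp [hz]
    · simp [hz]
  rw [pv_B_inv e (2 ^ e.length - 1) le_rfl]
  rw [show 2 ^ e.length - 1 + 1 = 2 ^ e.length by omega]
  apply List.ext_getElem?
  intro j
  rw [List.getElem?_set]
  simp only [pvSpecList, List.getElem?_map, List.length_map, List.length_range]
  rcases Nat.eq_zero_or_pos j with hj0 | hj0
  · subst hj0
    simp
  · rw [if_neg (by omega)]
    by_cases hj : j < 2 ^ e.length
    · rw [show (List.range (2 ^ e.length))[j]? = some j by simp [hj]]
      simp only [Option.map_some]
      rw [if_neg (by omega : ¬ j = 0), if_neg (by omega : ¬ j = 0)]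
    · rw [List.getElem?_eq_none (l := List.range (2 ^ e.length)) (by simp; omega)]
      rfl

-- ===== VERDICT (by name: the statement is the Claim_ definition above) =====
theorem get_edition_numbers_quoted_strings_spec : Claim_equal_get_edition_numbers_quoted_strings := by
  intro e _
  show _ = _
  rw [pv_A_eq, pv_B_eq]
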